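-- pv_equiv track=rewrite | github.com/csi9876/algo_study | 240621/2235_항체인식/sol.py | solution
-- ===== SOURCE A (Python) =====
-- from collections import deque
--
-- def bfs(x, y, num, before):
--     n = len(before)
--     m = len(before[0])
--     dx = [1, 0, -1, 0]
--     dy = [0, 1, 0, -1]
--     visit = [[False for _ in range(m)] for _ in range(n)]
--     temp = before[x][y]
--
--     q = deque()
--     q.append((x, y))
--     visit[x][y] = True
--
--     while q:
--         x, y = q.popleft()
--         before[x][y] = num
--
--         for k in range(4):
--             nx = x + dx[k]
--             ny = y + dy[k]
--             if not (0 <= nx < n and 0 <= ny < m):  # 범위를 벗어나면 무시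
--                 continue
--             if not visit[nx][ny] and before[nx][ny] == temp:  # 방문하지 않았고 값이 같다면
--                 q.append((nx, ny))
--                 visit[nx][ny] = True
--
-- def solution(n, m, before, after):
--     for i in range(n):
--         for j in range(m):
--             if before[i][j] != after[i][j]:  # 값이 다르면 BFS로 변경
--                 bfs(i, j, after[i][j], before)
--                 # 변경 후 행렬과 비교
--                 for r in range(n):
--                     for c in range(m):
--                         if before[r][c] != after[r][c]:  # 값이 다르면 "NO" 반환
--                             return "NO"
--                 return "YES"  # 모든 값이 같다면 "YES" 반환
--     return "YES"  # 처음부터 모든 값이 같다면 "YES" 반환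
-- ===== SOURCE B (Python) =====
-- def solution(n, m, before, after):
--     start = next(((i, j) for i in range(n) for j in range(m)
--                   if before[i][j] != after[i][j]), None)
--     if start is None:
--         return "YES"
--     i0, j0 = start
--     temp, num = before[i0][j0], after[i0][j0]
--     # label-propagation fixed point: no queue/stack and no mutation of `before`;
--     # repeatedly sweep the whole grid, adding any temp-valued cell adjacent to the
--     # component, until a sweep adds nothing
--     comp = {(i0, j0)}
--     changed = True
--     while changed:
--         changed = False
--         for i in range(n):
--             for j in range(m):
--                 if (i, j) not in comp and before[i][j] == temp and \
--                    ((i - 1, j) in comp or (i + 1, j) in comp or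
--                     (i, j - 1) in comp or (i, j + 1) in comp):
--                     comp.add((i, j))
--                     changed = True
--     # before-with-component-recoloured equals after iff: component cells carry num
--     # in `after`, all other cells are unchanged
--     ok = all((after[i][j] == num) if (i, j) in comp else (after[i][j] == before[i][j])
--              for i in range(n) for j in range(m))
--     return "YES" if ok else "NO"
-- ===== Notes on version B (the rewrite author's own statement) =====
-- stated objective: alternative
-- what changed: A's worklist BFS (deque + visit matrix) that mutates `before` in place is replaced by a label-propagation fixed point: B never mutates the grid and keeps no worklist at all, it repeatedly sweeps the whole grid adding any temp-valued cell adjacent to the component until a sweep adds nothing, then checks declaratively that component cells carry num in `after` and all other cells are unchanged.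
-- outside the precondition, e.g. on solution(1, 3, [[1, 0, 1], [1, 1, 1]], [[2, 0, 2]]): A returns 'YES', B returns 'NO'
import Mathlib
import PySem

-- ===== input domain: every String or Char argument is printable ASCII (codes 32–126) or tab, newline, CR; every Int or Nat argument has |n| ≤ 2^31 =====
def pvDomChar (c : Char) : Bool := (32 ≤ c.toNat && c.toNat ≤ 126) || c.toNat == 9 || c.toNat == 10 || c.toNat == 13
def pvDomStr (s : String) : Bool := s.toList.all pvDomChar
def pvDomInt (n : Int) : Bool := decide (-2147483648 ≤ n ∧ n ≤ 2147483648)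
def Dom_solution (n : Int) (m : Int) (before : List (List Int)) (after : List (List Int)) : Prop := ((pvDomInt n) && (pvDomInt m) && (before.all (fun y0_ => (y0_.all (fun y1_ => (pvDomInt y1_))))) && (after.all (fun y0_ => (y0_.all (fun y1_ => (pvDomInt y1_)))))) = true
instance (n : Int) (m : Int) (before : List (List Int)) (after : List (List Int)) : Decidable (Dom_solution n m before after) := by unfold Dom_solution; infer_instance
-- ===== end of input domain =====

-- B replaces A's worklist BFS (deque + visit matrix, in-place fill of `before`) by a
-- label-propagation fixed point that never mutates the grid (A mutates `before` in place,
-- B does not; the equivalence proved is about the return value only) plus a declarative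
-- final check.

-- shared grid accessor (Python's `g[i][j]` on in-range indices)
def mGet {α : Type} (d : α) (g : List (List α)) (i j : Nat) : α := (g.getD i []).getD j d

-- grid update `g[i][j] = v` (used by A's in-place fill only)
def mSet {α : Type} (g : List (List α)) (i j : Nat) (v : α) : List (List α) :=
  g.set i ((g.getD i []).set j v)

-- ===== PORT A =====
-- zip of A's dx = [1,0,-1,0], dy = [0,1,0,-1]
def dirsA : List (Int × Int) := [(1, 0), (0, 1), (-1, 0), (0, -1)]

-- body of A's `for k in range(4)` loop: bounds test, visit test, mark + enqueue
def bfsStep (n m : Nat) (temp : Int) (g : List (List Int)) (x y : Nat)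
    (s : List (List Bool) × List (Nat × Nat)) (d : Int × Int) :
    List (List Bool) × List (Nat × Nat) :=
  let nx : Int := (x : Int) + d.1
  let ny : Int := (y : Int) + d.2
  if 0 ≤ nx ∧ nx < (n : Int) ∧ 0 ≤ ny ∧ ny < (m : Int) then
    if mGet false s.1 nx.toNat ny.toNat = false ∧ mGet 0 g nx.toNat ny.toNat = temp then
      (mSet s.1 nx.toNat ny.toNat true, s.2 ++ [(nx.toNat, ny.toNat)])
    else s
  else s

-- A's `while q:` loop (fuel n*m+1 is an upper bound on the number of iterations: each
-- enqueue marks a distinct cell of the n×m visit matrix)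
def bfsLoop (n m : Nat) (temp num : Int) :
    Nat → List (List Int) → List (List Bool) → List (Nat × Nat) → List (List Int)
  | 0, g, _, _ => g
  | _ + 1, g, _, [] => g
  | fuel + 1, g, vis, (x, y) :: q =>
      let g' := mSet g x y num
      let vq := dirsA.foldl (bfsStep n m temp g' x y) (vis, q)
      bfsLoop n m temp num fuel g' vq.1 vq.2

-- A's bfs(x, y, num, before): n,m taken from the actual list (len(before), len(before[0]))
def bfsRun (x y : Nat) (num : Int) (before : List (List Int)) : List (List Int) :=
  let n := before.length
  let m := (before.headD []).length
  let temp := mGet 0 before x y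
  let vis0 := mSet (List.replicate n (List.replicate m false)) x y true
  bfsLoop n m temp num (n * m + 1) before vis0 [(x, y)]

def solution (n : Int) (m : Int) (before : List (List Int)) (after : List (List Int)) : String :=
  match (List.range n.toNat).findSome? (fun i =>
      (List.range m.toNat).findSome? (fun j =>
        if mGet 0 before i j ≠ mGet 0 after i j then some (i, j) else none)) with
  | none => "YES"
  | some (i, j) =>
      let filled := bfsRun i j (mGet 0 after i j) before
      if (List.range n.toNat).any (fun r =>
          (List.range m.toNat).any (fun c => mGet 0 filled r c != mGet 0 after r c))
      then "NO" else "YES"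

-- ===== PORT B =====
-- the n×m grid cells in B's sweep order (`for i in range(n): for j in range(m)` flattened)
def cellsB (n m : Nat) : List (Nat × Nat) :=
  (List.range n).flatMap (fun i => (List.range m).map (fun j => (i, j)))

-- one cell of B's sweep: add the cell if it is new, temp-valued and touches the component
-- (Python's `(i-1, j) in comp` with i = 0 tests (-1, j), never a member: hence the 1 ≤ guards)
def growCell (temp : Int) (g : List (List Int))
    (st : List (Nat × Nat) × Bool) (p : Nat × Nat) : List (Nat × Nat) × Bool :=
  if p ∉ st.1 ∧ mGet 0 g p.1 p.2 = temp ∧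
      ((1 ≤ p.1 ∧ (p.1 - 1, p.2) ∈ st.1) ∨ (p.1 + 1, p.2) ∈ st.1 ∨
       (1 ≤ p.2 ∧ (p.1, p.2 - 1) ∈ st.1) ∨ (p.1, p.2 + 1) ∈ st.1)
  then (p :: st.1, true) else st

-- B's `while changed:` loop (fuel n*m+1 bounds the sweeps: every sweep that sets
-- `changed` grows the component, which holds at most n*m distinct cells)
def growLoop (n m : Nat) (temp : Int) (g : List (List Int)) :
    Nat → List (Nat × Nat) → List (Nat × Nat)
  | 0, comp => comp
  | fuel + 1, comp =>
      let r := (cellsB n m).foldl (growCell temp g) (comp, false)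
      if r.2 then growLoop n m temp g fuel r.1 else r.1

def solution_alt (n : Int) (m : Int) (before : List (List Int)) (after : List (List Int)) : String :=
  match (List.range n.toNat).findSome? (fun i =>
      (List.range m.toNat).findSome? (fun j =>
        if mGet 0 before i j ≠ mGet 0 after i j then some (i, j) else none)) with
  | none => "YES"
  | some (i0, j0) =>
      let temp := mGet 0 before i0 j0
      let num := mGet 0 after i0 j0
      let comp := growLoop n.toNat m.toNat temp before (n.toNat * m.toNat + 1) [(i0, j0)]
      if (List.range n.toNat).all (fun i => (List.range m.toNat).all (fun j =>
          if (i, j) ∈ comp then mGet 0 after i j == num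
          else mGet 0 after i j == mGet 0 before i j))
      then "YES" else "NO"

-- ===== PRECONDITION & SPEC =====
-- Pre_ excludes grids whose list dimensions do not match n×m when some cell of the n×m
-- window differs: there A floods and indexes through before's ACTUAL rows (len(before),
-- len(before[0])) outside the stated window (or raises IndexError), while B confines itself
-- to the window.  (Window-indexable grids whose windows already agree are admitted: no fill
-- happens and both answer "YES".)
def Pre_solution (n : Int) (m : Int) (before : List (List Int)) (after : List (List Int)) : Prop :=
  n ≤ 0 ∨ m ≤ 0 ∨
    ((before.length : Int) = n ∧ (after.length : Int) = n ∧
     (∀ r ∈ before, (r.length : Int) = m) ∧ (∀ r ∈ after, (r.length : Int) = m)) ∨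
    (n.toNat ≤ before.length ∧ n.toNat ≤ after.length ∧
     (∀ i < n.toNat, m.toNat ≤ (before.getD i []).length ∧ m.toNat ≤ (after.getD i []).length) ∧
     (∀ i < n.toNat, ∀ j < m.toNat, mGet 0 before i j = mGet 0 after i j))
instance (n : Int) (m : Int) (before : List (List Int)) (after : List (List Int)) : Decidable (Pre_solution n m before after) := by unfold Pre_solution; infer_instance

def pvWitness_solution : Int × Int × List (List Int) × List (List Int) :=
  (2, 2, [[1, 1], [1, 2]], [[3, 3], [3, 2]])

def Spec_solution (n : Int) (m : Int) (before : List (List Int)) (after : List (List Int)) (out : String) : Prop := out = solution_alt n m before after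
instance (n : Int) (m : Int) (before : List (List Int)) (after : List (List Int)) (out : String) : Decidable (Spec_solution n m before after out) := by unfold Spec_solution; infer_instance

-- ===== CLAIM (what is proved, stated in full; the proofs are below) =====
def Claim_equal_solution : Prop := ∀ (n : Int) (m : Int) (before : List (List Int)) (after : List (List Int)), Dom_solution n m before after → Pre_solution n m before after → Spec_solution n m before after (solution n m before after)

-- ===== LEMMAS AND PROOFS =====

-- the common abstraction both sides are proved against: the connected component of
-- temp-valued cells inside the n×m window reachable from the start cell
def InWin (n m : Nat) (p : Nat × Nat) : Prop := p.1 < n ∧ p.2 < m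

def Adj (p q : Nat × Nat) : Prop :=
  (p.1 = q.1 ∧ (p.2 + 1 = q.2 ∨ q.2 + 1 = p.2)) ∨
  (p.2 = q.2 ∧ (p.1 + 1 = q.1 ∨ q.1 + 1 = p.1))

inductive Reach (n m : Nat) (orig : List (List Int)) (temp : Int) (s : Nat × Nat) :
    Nat × Nat → Prop
  | base : Reach n m orig temp s s
  | step {p q : Nat × Nat} : Reach n m orig temp s p → Adj p q → InWin n m q →
      mGet 0 orig q.1 q.2 = temp → Reach n m orig temp s q

def Shaped {α : Type} (n m : Nat) (g : List (List α)) : Prop :=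
  g.length = n ∧ ∀ r ∈ g, r.length = m

def cntP {α : Type} (p : α → Bool) (g : List (List α)) : Nat := (g.map (List.countP p)).sum


-- ---- basic matrix lemmas ----
theorem getD_set_self {α : Type} (l : List α) (i : Nat) (a d : α) (h : i < l.length) :
    (l.set i a).getD i d = a := by
  rw [List.getD_eq_getElem?_getD, List.getElem?_set_self h]
  simp

theorem getD_set_ne {α : Type} (l : List α) (i i' : Nat) (a d : α) (h : i ≠ i') :
    (l.set i a).getD i' d = l.getD i' d := by
  rw [List.getD_eq_getElem?_getD, List.getElem?_set_ne h, ← List.getD_eq_getElem?_getD]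

theorem mGet_mSet_ne {α : Type} (d v : α) (g : List (List α)) (i j i' j' : Nat)
    (h : ¬ (i = i' ∧ j = j')) : mGet d (mSet g i j v) i' j' = mGet d g i' j' := by
  unfold mGet mSet
  by_cases hi : i = i'
  · subst hi
    have hj : j ≠ j' := by tauto
    by_cases hlen : i < g.length
    · rw [getD_set_self _ _ _ _ hlen, getD_set_ne _ _ _ _ _ hj]
    · rw [List.set_eq_of_length_le (by omega)]
  · rw [getD_set_ne _ _ _ _ _ hi]

theorem mGet_mSet_self {α : Type} (d v : α) (g : List (List α)) (i j : Nat)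
    (hi : i < g.length) (hj : j < (g.getD i []).length) :
    mGet d (mSet g i j v) i j = v := by
  unfold mGet mSet
  rw [getD_set_self _ _ _ _ hi, getD_set_self _ _ _ _ hj]

theorem shaped_getD {α : Type} {n m : Nat} {g : List (List α)} (h : Shaped n m g)
    {i : Nat} (hi : i < n) : (g.getD i []).length = m := by
  obtain ⟨hlen, hrow⟩ := h
  have hi' : i < g.length := by omega
  rw [List.getD_eq_getElem?_getD, List.getElem?_eq_getElem hi']
  exact hrow _ (List.getElem_mem _)

theorem shaped_mSet {α : Type} {n m : Nat} {g : List (List α)} (h : Shaped n m g)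
    (i j : Nat) (v : α) : Shaped n m (mSet g i j v) := by
  by_cases hi : i < g.length
  · obtain ⟨hlen, hrow⟩ := h
    refine ⟨by simp [mSet, hlen], ?_⟩
    intro r hr
    rcases List.mem_or_eq_of_mem_set hr with h1 | h1
    · exact hrow _ h1
    · subst h1
      rw [List.length_set]
      rw [List.getD_eq_getElem?_getD, List.getElem?_eq_getElem hi]
      exact hrow _ (List.getElem_mem _)
  · unfold mSet
    rw [List.set_eq_of_length_le (by omega)]
    exact h

theorem mGet_replicate_false (n m i j : Nat) :
    mGet false (List.replicate n (List.replicate m false)) i j = false := by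
  simp only [mGet, List.getD_eq_getElem?_getD, List.getElem?_replicate]
  split_ifs <;> simp

-- ---- counting lemmas (for A's fuel bound) ----
theorem countP_set_add {α : Type} (p : α → Bool) (d : α) :
    ∀ (l : List α) (j : Nat) (v : α), j < l.length →
    (l.set j v).countP p + (if p (l.getD j d) then 1 else 0)
      = l.countP p + (if p v then 1 else 0) := by
  intro l
  induction l with
  | nil => intro j v h; simp at h
  | cons a t ih =>
      intro j v h
      cases j with
      | zero => simp [List.countP_cons]; split_ifs <;> omega
      | succ j =>
          have := ih j v (by simpa using h)
          simp only [List.set_cons_succ, List.countP_cons, List.getD_cons_succ]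
          split_ifs at this ⊢ <;> omega

theorem cntP_mSet_add {α : Type} (p : α → Bool) (d : α) :
    ∀ (g : List (List α)) (i j : Nat) (v : α), i < g.length → j < (g.getD i []).length →
    cntP p (mSet g i j v) + (if p (mGet d g i j) then 1 else 0)
      = cntP p g + (if p v then 1 else 0) := by
  intro g
  induction g with
  | nil => intro i j v h; simp at h
  | cons r t ih =>
      intro i j v hi hj
      cases i with
      | zero =>
          simp only [mSet, mGet, List.getD_cons_zero, List.set_cons_zero] at *
          simp only [cntP, List.map_cons, List.sum_cons]
          have := countP_set_add p d r j v hj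
          omega
      | succ i =>
          have hi' : i < t.length := by simpa using hi
          have hj' : j < (t.getD i []).length := by
            simpa [List.getD_cons_succ] using hj
          have := ih i j v hi' hj'
          have hms : mSet (r :: t) (i + 1) j v = r :: mSet t i j v := by
            simp [mSet, List.set_cons_succ]
          have hmg : mGet d (r :: t) (i + 1) j = mGet d t i j := by
            simp [mGet]
          rw [hms, hmg]
          simp only [cntP, List.map_cons, List.sum_cons] at this ⊢
          omega

theorem cntP_le {α : Type} (p : α → Bool) :
    ∀ {n m : Nat} {g : List (List α)}, Shaped n m g → cntP p g ≤ n * m := by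
  intro n m g
  induction g generalizing n with
  | nil => intro h; simp [cntP]
  | cons r t ih =>
      intro h
      obtain ⟨hlen, hrow⟩ := h
      cases n with
      | zero => simp at hlen
      | succ n =>
          have h1 : cntP p t ≤ n * m :=
            ih ⟨by simpa using hlen, fun r hr => hrow _ (List.mem_cons_of_mem _ hr)⟩
          have h2 : r.countP p ≤ m := by
            have := List.countP_le_length (p := p) (l := r)
            rw [hrow r (List.mem_cons_self)] at this
            exact this
          simp only [cntP, List.map_cons, List.sum_cons] at *
          calc r.countP p + (t.map (List.countP p)).sum ≤ m + n * m := by omega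
            _ = (n + 1) * m := by ring

theorem cntP_replicate_false (n m : Nat) :
    cntP (fun b => b) (List.replicate n (List.replicate m false)) = 0 := by
  simp [cntP, List.countP_eq_zero]


-- ---- adjacency vs direction list / neighbour patterns ----
theorem adj_of_dirA (x y : Nat) (p : Nat × Nat) (d : Int × Int) (hd : d ∈ dirsA)
    (h1 : (p.1 : Int) = x + d.1) (h2 : (p.2 : Int) = y + d.2) : Adj (x, y) p := by
  obtain ⟨a, b⟩ := p
  simp only [dirsA, List.mem_cons, List.not_mem_nil, or_false] at hd
  unfold Adj
  rcases hd with rfl | rfl | rfl | rfl <;> simp_all <;> omega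

theorem dir_of_adjA (x y : Nat) (p : Nat × Nat) (h : Adj (x, y) p) :
    ∃ d ∈ dirsA, (p.1 : Int) = x + d.1 ∧ (p.2 : Int) = y + d.2 := by
  obtain ⟨a, b⟩ := p
  unfold Adj at h
  simp only at h
  rcases h with ⟨h1, h2 | h2⟩ | ⟨h1, h2 | h2⟩
  · exact ⟨(0, 1), by simp [dirsA], by omega, by omega⟩
  · exact ⟨(0, -1), by simp [dirsA], by omega, by omega⟩
  · exact ⟨(1, 0), by simp [dirsA], by omega, by omega⟩
  · exact ⟨(-1, 0), by simp [dirsA], by omega, by omega⟩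

-- a neighbour of p is one of the four cells B's membership test probes
theorem adj_cases (p q : Nat × Nat) (h : Adj q p) :
    (1 ≤ p.1 ∧ q = (p.1 - 1, p.2)) ∨ q = (p.1 + 1, p.2) ∨
    (1 ≤ p.2 ∧ q = (p.1, p.2 - 1)) ∨ q = (p.1, p.2 + 1) := by
  obtain ⟨a, b⟩ := q
  obtain ⟨i, j⟩ := p
  unfold Adj at h
  simp only at h ⊢
  rcases h with ⟨h1, h2 | h2⟩ | ⟨h1, h2 | h2⟩
  · exact Or.inr (Or.inr (Or.inl ⟨by omega, by simp [Prod.ext_iff]; omega⟩))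
  · exact Or.inr (Or.inr (Or.inr (by simp [Prod.ext_iff]; omega)))
  · exact Or.inl ⟨by omega, by simp [Prod.ext_iff]; omega⟩
  · exact Or.inr (Or.inl (by simp [Prod.ext_iff]; omega))

-- the four probed cells (when their guard holds and they are members) are neighbours of p
theorem adj_of_pattern (p q : Nat × Nat)
    (h : (1 ≤ p.1 ∧ q = (p.1 - 1, p.2)) ∨ q = (p.1 + 1, p.2) ∨
         (1 ≤ p.2 ∧ q = (p.1, p.2 - 1)) ∨ q = (p.1, p.2 + 1)) : Adj q p := by
  obtain ⟨i, j⟩ := p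
  unfold Adj
  rcases h with ⟨h1, rfl⟩ | rfl | ⟨h1, rfl⟩ | rfl <;> simp <;> omega

-- ---- postcondition of A's inner direction loop ----
def AFoldPost (n m : Nat) (temp : Int) (g' : List (List Int)) (x y : Nat)
    (ds : List (Int × Int)) (vis : List (List Bool)) (q : List (Nat × Nat))
    (out : List (List Bool) × List (Nat × Nat)) : Prop :=
  Shaped n m out.1 ∧
  (∀ a b : Nat, mGet false vis a b = true → mGet false out.1 a b = true) ∧
  (∀ a b : Nat, mGet false out.1 a b = true →
    mGet false vis a b = true ∨
      (Adj (x, y) (a, b) ∧ InWin n m (a, b) ∧ mGet 0 g' a b = temp)) ∧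
  (∀ d ∈ ds, ∀ a b : Nat, (a : Int) = (x : Int) + d.1 → (b : Int) = (y : Int) + d.2 →
    InWin n m (a, b) → mGet 0 g' a b = temp → mGet false out.1 a b = true) ∧
  (∃ new, out.2 = q ++ new ∧ new.Nodup ∧
    (∀ p ∈ new, mGet false vis p.1 p.2 = false ∧ mGet false out.1 p.1 p.2 = true ∧
      InWin n m p ∧ Adj (x, y) p ∧ mGet 0 g' p.1 p.2 = temp) ∧
    (∀ a b : Nat, mGet false out.1 a b = true → mGet false vis a b = false → (a, b) ∈ new) ∧
    cntP (fun c => c) out.1 + q.length = cntP (fun c => c) vis + out.2.length)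

theorem bfsFold (n m : Nat) (temp : Int) (g' : List (List Int)) (x y : Nat) :
    ∀ (ds : List (Int × Int)) (vis : List (List Bool)) (q : List (Nat × Nat)),
    (∀ d ∈ ds, d ∈ dirsA) → Shaped n m vis →
    AFoldPost n m temp g' x y ds vis q (ds.foldl (bfsStep n m temp g' x y) (vis, q)) := by
  intro ds
  induction ds with
  | nil =>
      intro vis q _ hsh
      unfold AFoldPost
      simp only [List.foldl_nil]
      exact ⟨hsh, fun a b h => h, fun a b h => Or.inl h, by simp,
        ⟨[], by simp, List.nodup_nil, by simp, by simp_all, by simp⟩⟩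
  | cons d ds ih =>
      intro vis q hsub hsh
      have hdA : d ∈ dirsA := hsub d (List.mem_cons_self)
      have hsub' : ∀ d' ∈ ds, d' ∈ dirsA := fun d' h => hsub d' (List.mem_cons_of_mem _ h)
      rw [List.foldl_cons]
      by_cases hb : 0 ≤ (x : Int) + d.1 ∧ (x : Int) + d.1 < (n : Int) ∧
          0 ≤ (y : Int) + d.2 ∧ (y : Int) + d.2 < (m : Int)
      · by_cases ht : mGet false vis ((x : Int) + d.1).toNat ((y : Int) + d.2).toNat = false ∧
            mGet 0 g' ((x : Int) + d.1).toNat ((y : Int) + d.2).toNat = temp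
        · -- pushed branch
          set a0 := ((x : Int) + d.1).toNat with ha0
          set b0 := ((y : Int) + d.2).toNat with hb0
          have hxa : (a0 : Int) = (x : Int) + d.1 := by rw [ha0]; omega
          have hyb : (b0 : Int) = (y : Int) + d.2 := by rw [hb0]; omega
          have hstep : bfsStep n m temp g' x y (vis, q) d
              = (mSet vis a0 b0 true, q ++ [(a0, b0)]) := by
            simp only [bfsStep]
            rw [if_pos hb, if_pos (show mGet false vis ((x : Int) + d.1).toNat
              ((y : Int) + d.2).toNat = false ∧ mGet 0 g' ((x : Int) + d.1).toNat
              ((y : Int) + d.2).toNat = temp from ht)]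
          rw [hstep]
          have hwin : InWin n m (a0, b0) := ⟨by omega, by omega⟩
          have hadj : Adj (x, y) (a0, b0) :=
            adj_of_dirA x y (a0, b0) d hdA (by simpa using hxa) (by simpa using hyb)
          have hsh1 : Shaped n m (mSet vis a0 b0 true) := shaped_mSet hsh a0 b0 true
          have hget1 : mGet false (mSet vis a0 b0 true) a0 b0 = true := by
            refine mGet_mSet_self _ _ _ _ _ ?_ ?_
            · rw [hsh.1]; exact hwin.1
            · rw [shaped_getD hsh hwin.1]; exact hwin.2
          have hmono1 : ∀ a b : Nat, mGet false vis a b = true →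
              mGet false (mSet vis a0 b0 true) a b = true := by
            intro a b h
            by_cases hab : a0 = a ∧ b0 = b
            · obtain ⟨rfl, rfl⟩ := hab; exact hget1
            · rw [mGet_mSet_ne _ _ _ _ _ _ _ hab]; exact h
          have hih := ih (mSet vis a0 b0 true) (q ++ [(a0, b0)]) hsub' hsh1
          unfold AFoldPost at hih ⊢
          obtain ⟨hosh, homono, hnew', hdall, new1, hq1, hnd1, hprops1, hconv1, hcnt1⟩ := hih
          refine ⟨hosh, fun a b h => homono a b (hmono1 a b h), ?_, ?_,
            ⟨(a0, b0) :: new1, ?_, ?_, ?_, ?_, ?_⟩⟩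
          · intro a b h
            rcases hnew' a b h with h1 | h1
            · by_cases hab : a0 = a ∧ b0 = b
              · obtain ⟨rfl, rfl⟩ := hab
                exact Or.inr ⟨hadj, hwin, ht.2⟩
              · rw [mGet_mSet_ne _ _ _ _ _ _ _ hab] at h1; exact Or.inl h1
            · exact Or.inr h1
          · intro d' hd' a b h1 h2 hw hg
            rcases List.mem_cons.mp hd' with rfl | hd'
            · have : a = a0 ∧ b = b0 := by constructor <;> omega
              obtain ⟨rfl, rfl⟩ := this
              exact homono _ _ hget1
            · exact hdall d' hd' a b h1 h2 hw hg
          · rw [hq1]; simp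
          · refine List.Nodup.cons ?_ hnd1
            intro hmem
            have := (hprops1 _ hmem).1
            simp only at this
            rw [hget1] at this; exact absurd this (by simp)
          · intro p hp
            rcases List.mem_cons.mp hp with rfl | hp
            · exact ⟨ht.1, homono _ _ hget1, hwin, hadj, ht.2⟩
            · have h := hprops1 _ hp
              refine ⟨?_, h.2.1, h.2.2.1, h.2.2.2.1, h.2.2.2.2⟩
              by_cases hab : a0 = p.1 ∧ b0 = p.2
              · exfalso
                have h2 := h.1
                have heq : mGet false (mSet vis a0 b0 true) p.1 p.2 = true := by
                  obtain ⟨h1', h2'⟩ := hab; rw [← h1', ← h2']; exact hget1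
                rw [heq] at h2; exact absurd h2 (by simp)
              · have := h.1
                rwa [mGet_mSet_ne _ _ _ _ _ _ _ hab] at this
          · -- converse: an out-true, vis-false cell is among the new elements
            intro a b hout hvis
            by_cases hab : a0 = a ∧ b0 = b
            · obtain ⟨rfl, rfl⟩ := hab; exact List.mem_cons_self
            · refine List.mem_cons_of_mem _ (hconv1 a b hout ?_)
              rw [mGet_mSet_ne _ _ _ _ _ _ _ hab]; exact hvis
          · have hin1 : a0 < vis.length := by rw [hsh.1]; exact hwin.1
            have hin2 : b0 < (vis.getD a0 []).length := by
              rw [shaped_getD hsh hwin.1]; exact hwin.2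
            have hc := cntP_mSet_add (fun c => c) false vis a0 b0 true hin1 hin2
            rw [ht.1] at hc
            simp only [Bool.false_eq_true, if_false, if_true] at hc
            simp only [List.length_append, List.length_cons, List.length_nil] at hcnt1 ⊢
            omega
        · -- in bounds but test fails: state unchanged
          have hstep : bfsStep n m temp g' x y (vis, q) d = (vis, q) := by
            simp only [bfsStep]
            rw [if_pos hb, if_neg ht]
          rw [hstep]
          have hih := ih vis q hsub' hsh
          unfold AFoldPost at hih ⊢
          obtain ⟨hosh, homono, hnew', hdall, hrest⟩ := hih
          refine ⟨hosh, homono, hnew', ?_, hrest⟩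
          intro d' hd' a b h1 h2 hw hg
          rcases List.mem_cons.mp hd' with rfl | hd'
          · have ha : ((x : Int) + d'.1).toNat = a := by omega
            have hbb : ((y : Int) + d'.2).toNat = b := by omega
            rw [ha, hbb] at ht
            have hv : mGet false vis a b = true := by
              by_contra hc
              exact ht ⟨by simpa using hc, hg⟩
            exact homono _ _ hv
          · exact hdall d' hd' a b h1 h2 hw hg
      · -- out of bounds: state unchanged, and the direction is vacuous
        have hstep : bfsStep n m temp g' x y (vis, q) d = (vis, q) := by
          simp only [bfsStep]
          rw [if_neg hb]
        rw [hstep]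
        have hih := ih vis q hsub' hsh
        unfold AFoldPost at hih ⊢
        obtain ⟨hosh, homono, hnew', hdall, hrest⟩ := hih
        refine ⟨hosh, homono, hnew', ?_, hrest⟩
        intro d' hd' a b h1 h2 hw hg
        rcases List.mem_cons.mp hd' with rfl | hd'
        · exfalso
          obtain ⟨hw1, hw2⟩ := hw
          simp only at hw1 hw2
          exact hb ⟨by omega, by omega, by omega, by omega⟩
        · exact hdall d' hd' a b h1 h2 hw hg


-- ---- A-side loop invariant and characterisation ----
theorem ne_pair_iff {p : Nat × Nat} {x y : Nat} (h : p ≠ (x, y)) :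
    ¬ (x = p.1 ∧ y = p.2) := by
  rintro ⟨h1, h2⟩
  exact h (by cases p; simp_all)

structure InvA (n m : Nat) (orig : List (List Int)) (temp num : Int) (s : Nat × Nat)
    (g : List (List Int)) (vis : List (List Bool)) (q : List (Nat × Nat)) : Prop where
  shg : Shaped n m g
  shv : Shaped n m vis
  hs : mGet false vis s.1 s.2 = true
  hq : ∀ p ∈ q, InWin n m p ∧ mGet false vis p.1 p.2 = true ∧
        mGet 0 orig p.1 p.2 = temp ∧ Reach n m orig temp s p ∧
        mGet 0 g p.1 p.2 = mGet 0 orig p.1 p.2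
  hnd : q.Nodup
  hvis : ∀ p : Nat × Nat, mGet false vis p.1 p.2 = true →
        InWin n m p ∧ Reach n m orig temp s p ∧ mGet 0 orig p.1 p.2 = temp
  hpop : ∀ p : Nat × Nat, mGet false vis p.1 p.2 = true → p ∉ q → mGet 0 g p.1 p.2 = num
  hunv : ∀ p : Nat × Nat, mGet false vis p.1 p.2 = false →
        mGet 0 g p.1 p.2 = mGet 0 orig p.1 p.2
  hcl : ∀ p : Nat × Nat, mGet false vis p.1 p.2 = true → p ∉ q →
        ∀ p' : Nat × Nat, Adj p p' → InWin n m p' → mGet 0 orig p'.1 p'.2 = temp →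
          mGet false vis p'.1 p'.2 = true

theorem bfsLoop_char (n m : Nat) (orig : List (List Int)) (temp num : Int) (s : Nat × Nat) :
    ∀ (fuel : Nat) (g : List (List Int)) (vis : List (List Bool)) (q : List (Nat × Nat)),
    InvA n m orig temp num s g vis q →
    q.length + (n * m - cntP (fun c => c) vis) < fuel →
    ∀ p : Nat × Nat, InWin n m p →
      (Reach n m orig temp s p → mGet 0 (bfsLoop n m temp num fuel g vis q) p.1 p.2 = num) ∧
      (¬ Reach n m orig temp s p →
        mGet 0 (bfsLoop n m temp num fuel g vis q) p.1 p.2 = mGet 0 orig p.1 p.2) := by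
  intro fuel
  induction fuel with
  | zero => intro g vis q _ hF; exact absurd hF (Nat.not_lt_zero _)
  | succ fuel ih =>
      intro g vis q inv hF
      match q with
      | [] =>
          have hred : bfsLoop n m temp num (fuel + 1) g vis [] = g := by
            simp [bfsLoop]
          have hreach : ∀ p : Nat × Nat, Reach n m orig temp s p →
              mGet false vis p.1 p.2 = true := by
            intro p hr
            induction hr with
            | base => exact inv.hs
            | step hr hadj hwin htmp ihh =>
                exact inv.hcl _ ihh (List.not_mem_nil) _ hadj hwin htmp
          intro p hw
          constructor
          · intro hr
            rw [hred]
            exact inv.hpop p (hreach p hr) (List.not_mem_nil)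
          · intro hr
            rw [hred]
            by_cases hv : mGet false vis p.1 p.2 = true
            · exact absurd (inv.hvis p hv).2.1 hr
            · exact inv.hunv p (by simpa using hv)
      | (x, y) :: q =>
          have hred : bfsLoop n m temp num (fuel + 1) g vis ((x, y) :: q)
              = bfsLoop n m temp num fuel (mSet g x y num)
                  (dirsA.foldl (bfsStep n m temp (mSet g x y num) x y) (vis, q)).1
                  (dirsA.foldl (bfsStep n m temp (mSet g x y num) x y) (vis, q)).2 := by
            simp [bfsLoop]
          set g' := mSet g x y num with hg'
          obtain ⟨hwxy, hvxy, hoxy, hrxy, hgxy⟩ := inv.hq (x, y) List.mem_cons_self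
          have hxnin : (x, y) ∉ q := (List.nodup_cons.mp inv.hnd).1
          have hndq : q.Nodup := (List.nodup_cons.mp inv.hnd).2
          have hshg' : Shaped n m g' := shaped_mSet inv.shg x y num
          have hg'xy : mGet 0 g' x y = num := by
            refine mGet_mSet_self _ _ _ _ _ ?_ ?_
            · rw [inv.shg.1]; exact hwxy.1
            · rw [shaped_getD inv.shg hwxy.1]; exact hwxy.2
          have hg'ne : ∀ p : Nat × Nat, p ≠ (x, y) →
              mGet 0 g' p.1 p.2 = mGet 0 g p.1 p.2 := by
            intro p hp
            exact mGet_mSet_ne _ _ _ _ _ _ _ (ne_pair_iff hp)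
          have hfold := bfsFold n m temp g' x y dirsA vis q (fun d h => h) inv.shv
          unfold AFoldPost at hfold
          obtain ⟨hosh, homono, hnew', hdall, new, hq', hndnew, hprops, hconv, hcnt⟩ := hfold
          have hunv' : ∀ p : Nat × Nat, mGet false vis p.1 p.2 = false →
              mGet 0 g' p.1 p.2 = mGet 0 orig p.1 p.2 := by
            intro p hp
            have hpne : p ≠ (x, y) := by
              intro h; rw [h] at hp; rw [hvxy] at hp; exact absurd hp (by simp)
            rw [hg'ne p hpne]
            exact inv.hunv p hp
          have hinv' : InvA n m orig temp num s g' (dirsA.foldl (bfsStep n m temp g' x y) (vis, q)).1 (dirsA.foldl (bfsStep n m temp g' x y) (vis, q)).2 := by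
            refine ⟨hshg', hosh, homono _ _ inv.hs, ?_, ?_, ?_, ?_, ?_, ?_⟩
            · -- hq
              intro p hp
              rw [hq'] at hp
              rcases List.mem_append.mp hp with hp | hp
              · obtain ⟨hw1, hv1, ho1, hr1, hgv1⟩ := inv.hq p (List.mem_cons_of_mem _ hp)
                have hpne : p ≠ (x, y) := fun h => hxnin (h ▸ hp)
                exact ⟨hw1, homono _ _ hv1, ho1, hr1, by rw [hg'ne p hpne]; exact hgv1⟩
              · obtain ⟨hvf, hvt, hw1, hadj1, hgt1⟩ := hprops p hp
                have ho1 : mGet 0 orig p.1 p.2 = temp := by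
                  rw [← hunv' p hvf]; exact hgt1
                exact ⟨hw1, hvt, ho1, Reach.step hrxy hadj1 hw1 ho1, hunv' p hvf⟩
            · -- nodup
              rw [hq']
              have hdisj : q.Disjoint new := by
                intro a ha hb
                have hva := (inv.hq a (List.mem_cons_of_mem _ ha)).2.1
                have hfa := (hprops a hb).1
                rw [hva] at hfa
                exact absurd hfa (by simp)
              exact List.Nodup.append hndq hndnew hdisj
            · -- hvis
              intro p hp
              by_cases hv : mGet false vis p.1 p.2 = true
              · exact inv.hvis p hv
              · have hvf : mGet false vis p.1 p.2 = false := by simpa using hv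
                rcases hnew' p.1 p.2 hp with h1 | h1
                · exact absurd h1 hv
                · obtain ⟨hadj1, hw1, hgt1⟩ := h1
                  have h1' : Adj (x, y) (p.1, p.2) = Adj (x, y) p := by cases p; rfl
                  have ho1 : mGet 0 orig p.1 p.2 = temp := by
                    rw [← hunv' p hvf]; exact hgt1
                  exact ⟨hw1, Reach.step hrxy (by rw [← h1']; exact hadj1) hw1 ho1, ho1⟩
            · -- hpop
              intro p hp hnin
              by_cases hpx : p = (x, y)
              · rw [hpx]; exact hg'xy
              · rw [hg'ne p hpx]
                by_cases hv : mGet false vis p.1 p.2 = true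
                · refine inv.hpop p hv ?_
                  intro hin
                  rcases List.mem_cons.mp hin with h | h
                  · exact hpx h
                  · exact hnin (by rw [hq']; exact List.mem_append.mpr (Or.inl h))
                · exfalso
                  have hvf : mGet false vis p.1 p.2 = false := by simpa using hv
                  have hmem := hconv p.1 p.2 hp hvf
                  have : p ∈ new := by cases p; exact hmem
                  exact hnin (by rw [hq']; exact List.mem_append.mpr (Or.inr this))
            · -- hunv
              intro p hp
              have hvf : mGet false vis p.1 p.2 = false := by
                by_contra hc
                have : mGet false vis p.1 p.2 = true := by simpa using hc
                rw [homono _ _ this] at hp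
                exact absurd hp (by simp)
              exact hunv' p hvf
            · -- hcl
              intro p hp hnin p' hadj1 hw1 ho1
              by_cases hpx : p = (x, y)
              · subst hpx
                by_cases hv' : mGet false vis p'.1 p'.2 = true
                · exact homono _ _ hv'
                · have hvf' : mGet false vis p'.1 p'.2 = false := by simpa using hv'
                  have hgt' : mGet 0 g' p'.1 p'.2 = temp := by
                    rw [hunv' p' hvf']; exact ho1
                  obtain ⟨d, hd, hc1, hc2⟩ := dir_of_adjA x y p' hadj1
                  exact hdall d hd p'.1 p'.2 hc1 hc2 (by cases p'; exact hw1) hgt'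
              · have hv : mGet false vis p.1 p.2 = true := by
                  by_contra hc
                  have hvf : mGet false vis p.1 p.2 = false := by simpa using hc
                  have hmem := hconv p.1 p.2 hp hvf
                  have : p ∈ new := by cases p; exact hmem
                  exact hnin (by rw [hq']; exact List.mem_append.mpr (Or.inr this))
                have hninq : p ∉ (x, y) :: q := by
                  intro hin
                  rcases List.mem_cons.mp hin with h | h
                  · exact hpx h
                  · exact hnin (by rw [hq']; exact List.mem_append.mpr (Or.inl h))
                exact homono _ _ (inv.hcl p hv hninq p' hadj1 hw1 ho1)
          have hcle : cntP (fun c => c) (dirsA.foldl (bfsStep n m temp g' x y) (vis, q)).1 ≤ n * m :=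
            cntP_le _ hosh
          have hlen : (dirsA.foldl (bfsStep n m temp g' x y) (vis, q)).2.length
              = q.length + new.length := by
            rw [hq']; simp
          have hF' : (dirsA.foldl (bfsStep n m temp g' x y) (vis, q)).2.length
              + (n * m - cntP (fun c => c) (dirsA.foldl (bfsStep n m temp g' x y) (vis, q)).1)
              < fuel := by
            simp only [List.length_cons] at hF
            omega
          rw [hred]
          exact ih g' _ _ hinv' hF'


-- ---- B-side: membership in a window-sized nodup list is bounded ----
theorem nodup_inwin_length_le (n m : Nat) (l : List (Nat × Nat)) (hnd : l.Nodup)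
    (h : ∀ p ∈ l, InWin n m p) : l.length ≤ n * m := by
  have h1 : l.toFinset ⊆ Finset.range n ×ˢ Finset.range m := by
    intro p hp
    rw [List.mem_toFinset] at hp
    obtain ⟨h2, h3⟩ := h p hp
    simp [Finset.mem_product, Finset.mem_range]
    exact ⟨h2, h3⟩
  have := Finset.card_le_card h1
  rwa [List.toFinset_card_of_nodup hnd, Finset.card_product, Finset.card_range,
    Finset.card_range] at this

theorem mem_cellsB (n m : Nat) (p : Nat × Nat) :
    p ∈ cellsB n m ↔ InWin n m p := by
  obtain ⟨i, j⟩ := p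
  simp [cellsB, List.mem_flatMap, InWin]

-- a member of the component is in the window, reachable, and temp-valued (or the start)
def GoodC (n m : Nat) (g : List (List Int)) (temp : Int) (s : Nat × Nat) (p : Nat × Nat) : Prop :=
  InWin n m p ∧ Reach n m g temp s p ∧ mGet 0 g p.1 p.2 = temp

-- the sweep never resets the `changed` flag
theorem growFlag (temp : Int) (g : List (List Int)) :
    ∀ (cs : List (Nat × Nat)) (comp : List (Nat × Nat)),
    (cs.foldl (growCell temp g) (comp, true)).2 = true := by
  intro cs
  induction cs with
  | nil => intro comp; simp
  | cons c cs ih =>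
      intro comp
      rw [List.foldl_cons]
      simp only [growCell]
      split_ifs with h
      · exact ih (c :: comp)
      · exact ih comp

-- ---- postcondition of one sweep of B's fixed-point loop ----
theorem growFold (n m : Nat) (temp : Int) (g : List (List Int)) (s : Nat × Nat) :
    ∀ (cs : List (Nat × Nat)) (comp : List (Nat × Nat)) (b : Bool),
    (∀ p ∈ cs, InWin n m p) → comp.Nodup → (∀ p ∈ comp, GoodC n m g temp s p) →
    (∀ p ∈ comp, p ∈ (cs.foldl (growCell temp g) (comp, b)).1) ∧
    (∀ p ∈ (cs.foldl (growCell temp g) (comp, b)).1, GoodC n m g temp s p) ∧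
    (cs.foldl (growCell temp g) (comp, b)).1.Nodup ∧
    comp.length ≤ (cs.foldl (growCell temp g) (comp, b)).1.length ∧
    ((cs.foldl (growCell temp g) (comp, b)).2 = true →
      b = true ∨ comp.length < (cs.foldl (growCell temp g) (comp, b)).1.length) ∧
    ((cs.foldl (growCell temp g) (comp, b)).2 = false →
      (cs.foldl (growCell temp g) (comp, b)).1 = comp ∧
      ∀ p ∈ cs, p ∉ comp → mGet 0 g p.1 p.2 = temp → ∀ q, Adj q p → q ∉ comp) := by
  intro cs
  induction cs with
  | nil =>
      intro comp b _ hnd hgood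
      simp only [List.foldl_nil]
      refine ⟨fun p hp => hp, hgood, hnd, le_refl _, fun h => Or.inl h, fun _ => ?_⟩
      constructor
      · trivial
      · intro p hp
        exact absurd hp (List.not_mem_nil)
  | cons c cs ih =>
      intro comp b hwin hnd hgood
      have hwin' : ∀ p ∈ cs, InWin n m p := fun p hp => hwin p (List.mem_cons_of_mem _ hp)
      have hwc : InWin n m c := hwin c List.mem_cons_self
      rw [List.foldl_cons]
      by_cases hc : c ∉ comp ∧ mGet 0 g c.1 c.2 = temp ∧
          ((1 ≤ c.1 ∧ (c.1 - 1, c.2) ∈ comp) ∨ (c.1 + 1, c.2) ∈ comp ∨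
           (1 ≤ c.2 ∧ (c.1, c.2 - 1) ∈ comp) ∨ (c.1, c.2 + 1) ∈ comp)
      · -- c is added
        have hstep : growCell temp g (comp, b) c = (c :: comp, true) := by
          simp only [growCell]
          rw [if_pos hc]
        rw [hstep]
        -- the touched neighbour is Good, so c is reachable
        have hr : Reach n m g temp s c := by
          obtain ⟨_, htc, hnb⟩ := hc
          have : ∃ q, q ∈ comp ∧ Adj q c := by
            rcases hnb with ⟨h1, h2⟩ | h2 | ⟨h1, h2⟩ | h2
            · exact ⟨_, h2, adj_of_pattern c _ (Or.inl ⟨h1, rfl⟩)⟩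
            · exact ⟨_, h2, adj_of_pattern c _ (Or.inr (Or.inl rfl))⟩
            · exact ⟨_, h2, adj_of_pattern c _ (Or.inr (Or.inr (Or.inl ⟨h1, rfl⟩)))⟩
            · exact ⟨_, h2, adj_of_pattern c _ (Or.inr (Or.inr (Or.inr rfl)))⟩
          obtain ⟨q, hq, hadj⟩ := this
          exact Reach.step (hgood q hq).2.1 hadj hwc htc
        have hgood' : ∀ p ∈ c :: comp, GoodC n m g temp s p := by
          intro p hp
          rcases List.mem_cons.mp hp with rfl | hp
          · exact ⟨hwc, hr, hc.2.1⟩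
          · exact hgood p hp
        have hnd' : (c :: comp).Nodup := List.Nodup.cons hc.1 hnd
        obtain ⟨m1, m2, m3, m4, m5, m6⟩ := ih (c :: comp) true hwin' hnd' hgood'
        refine ⟨fun p hp => m1 p (List.mem_cons_of_mem _ hp), m2, m3, ?_, ?_, ?_⟩
        · have := m4
          simp only [List.length_cons] at this
          omega
        · intro _
          right
          have := m4
          simp only [List.length_cons] at this
          omega
        · intro hf
          have := growFlag temp g cs (c :: comp)
          rw [hf] at this
          exact absurd this (by simp)
      · -- c is skipped
        have hstep : growCell temp g (comp, b) c = (comp, b) := by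
          simp only [growCell]
          rw [if_neg hc]
        rw [hstep]
        obtain ⟨m1, m2, m3, m4, m5, m6⟩ := ih comp b hwin' hnd hgood
        refine ⟨m1, m2, m3, m4, m5, ?_⟩
        intro hf
        obtain ⟨h1, h2⟩ := m6 hf
        refine ⟨h1, ?_⟩
        intro p hp hpn hpt q hadj hqin
        rcases List.mem_cons.mp hp with rfl | hp
        · -- c itself could not be added: its neighbour test failed
          apply hc
          refine ⟨hpn, hpt, ?_⟩
          rcases adj_cases p q hadj with ⟨h3, rfl⟩ | rfl | ⟨h3, rfl⟩ | rfl
          · exact Or.inl ⟨h3, hqin⟩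
          · exact Or.inr (Or.inl hqin)
          · exact Or.inr (Or.inr (Or.inl ⟨h3, hqin⟩))
          · exact Or.inr (Or.inr (Or.inr hqin))
        · exact h2 p hp hpn hpt q hadj hqin

-- ---- B-side loop characterisation ----
theorem growLoop_char (n m : Nat) (temp : Int) (g : List (List Int)) (s : Nat × Nat)
    (_hsG : GoodC n m g temp s s) :
    ∀ (fuel : Nat) (comp : List (Nat × Nat)), comp.Nodup →
    (∀ p ∈ comp, GoodC n m g temp s p) → s ∈ comp →
    n * m < comp.length + fuel →
    ∀ p : Nat × Nat,
      p ∈ growLoop n m temp g fuel comp ↔ Reach n m g temp s p := by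
  intro fuel
  induction fuel with
  | zero =>
      intro comp hnd hgood hs hF p
      exfalso
      have := nodup_inwin_length_le n m comp hnd (fun q hq => (hgood q hq).1)
      omega
  | succ fuel ih =>
      intro comp hnd hgood hs hF p
      have hwinc : ∀ q ∈ cellsB n m, InWin n m q := fun q hq => (mem_cellsB n m q).mp hq
      obtain ⟨m1, m2, m3, m4, m5, m6⟩ :=
        growFold n m temp g s (cellsB n m) comp false hwinc hnd hgood
      simp only [growLoop]
      by_cases hflag : ((cellsB n m).foldl (growCell temp g) (comp, false)).2 = true
      · rw [if_pos hflag]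
        rcases m5 hflag with h | h
        · exact absurd h (by simp)
        · exact ih _ m3 m2 (m1 s hs) (by omega) p
      · rw [if_neg hflag]
        obtain ⟨heq, hcl⟩ := m6 (Bool.eq_false_iff.mpr hflag)
        rw [heq]
        constructor
        · intro hp
          exact (hgood p hp).2.1
        · intro hr
          induction hr with
          | base => exact hs
          | step hr hadj hwin htmp ihh =>
              rename_i p0 q0
              by_cases hin : q0 ∈ comp
              · exact hin
              · exfalso
                exact hcl q0 ((mem_cellsB n m q0).mpr hwin) hin htmp p0 hadj ihh

-- ---- assembling the equivalence ----
theorem shaped_replicate (n m : Nat) :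
    Shaped n m (List.replicate n (List.replicate m false)) := by
  refine ⟨by simp, ?_⟩
  intro r hr
  rw [List.eq_of_mem_replicate hr]
  simp

theorem cnt_vis0 (n m i j : Nat) (hi : i < n) (hj : j < m) :
    cntP (fun c => c) (mSet (List.replicate n (List.replicate m false)) i j true) = 1 := by
  have hsh := shaped_replicate n m
  have h1 : i < (List.replicate n (List.replicate m false)).length := by
    rw [hsh.1]; exact hi
  have h2 : j < ((List.replicate n (List.replicate m false)).getD i []).length := by
    rw [shaped_getD hsh hi]; exact hj
  have := cntP_mSet_add (fun c => c) false (List.replicate n (List.replicate m false))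
    i j true h1 h2
  rw [mGet_replicate_false, cntP_replicate_false] at this
  simpa using this

-- ===== VERDICT (by name: the statement is the Claim_ definition above) =====
theorem solution_spec : Claim_equal_solution := by
  intro n m before after hdom hpre
  unfold Spec_solution
  unfold solution solution_alt
  cases hs : (List.range n.toNat).findSome? (fun i =>
      (List.range m.toNat).findSome? (fun j =>
        if mGet 0 before i j ≠ mGet 0 after i j then some (i, j) else none)) with
  | none =>
      have hall : ∀ i ∈ List.range n.toNat, ∀ j ∈ List.range m.toNat,
          mGet 0 before i j = mGet 0 after i j := by
        intro i hi j hj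
        have h1 := List.findSome?_eq_none_iff.mp hs i hi
        have h2 := List.findSome?_eq_none_iff.mp h1 j hj
        by_cases hc : mGet 0 before i j ≠ mGet 0 after i j
        · rw [if_pos hc] at h2; exact absurd h2 (by simp)
        · simpa using hc
      rfl
  | some ij =>
      obtain ⟨i, j⟩ := ij
      obtain ⟨i0, hi0, hinner⟩ := List.exists_of_findSome?_eq_some hs
      obtain ⟨j0, hj0, hcell⟩ := List.exists_of_findSome?_eq_some hinner
      have hij : i0 = i ∧ j0 = j ∧ mGet 0 before i0 j0 ≠ mGet 0 after i0 j0 := by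
        by_cases hc : mGet 0 before i0 j0 ≠ mGet 0 after i0 j0
        · rw [if_pos hc] at hcell
          have := Option.some.inj hcell
          exact ⟨congrArg Prod.fst this, congrArg Prod.snd this, hc⟩
        · rw [if_neg hc] at hcell; exact absurd hcell (by simp)
      obtain ⟨rfl, rfl, hne⟩ := hij
      rw [List.mem_range] at hi0 hj0
      -- the precondition forces exact n×m dimensions here
      have hdims : (before.length : Int) = n ∧ (∀ r ∈ before, (r.length : Int) = m) := by
        rcases hpre with h | h | h | h
        · exfalso; omega
        · exfalso; omega
        · exact ⟨h.1, h.2.2.1⟩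
        · exact absurd (h.2.2.2 i0 hi0 j0 hj0) hne
      have hlenb : before.length = n.toNat := by omega
      have hshb : Shaped n.toNat m.toNat before := by
        refine ⟨hlenb, ?_⟩
        intro r hr
        have := hdims.2 r hr
        omega
      have hm0 : (before.headD []).length = m.toNat := by
        have hne0 : before ≠ [] := by
          intro h; rw [h] at hlenb; simp at hlenb; omega
        obtain ⟨r, t, rfl⟩ := List.exists_cons_of_ne_nil hne0
        simp only [List.headD_cons]
        have := hdims.2 r List.mem_cons_self
        omega
      set temp := mGet 0 before i0 j0 with htemp
      set num := mGet 0 after i0 j0 with hnum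
      set comp := growLoop n.toNat m.toNat temp before (n.toNat * m.toNat + 1) [(i0, j0)]
        with hcompdef
      show (if ((List.range n.toNat).any fun r => (List.range m.toNat).any fun c =>
            mGet 0 (bfsRun i0 j0 num before) r c != mGet 0 after r c) = true
          then "NO" else "YES")
        = (if ((List.range n.toNat).all fun a => (List.range m.toNat).all fun b =>
            if (a, b) ∈ comp then mGet 0 after a b == num
            else mGet 0 after a b == mGet 0 before a b) = true
          then "YES" else "NO")
      have hwin0 : InWin n.toNat m.toNat (i0, j0) := ⟨hi0, hj0⟩
      -- A's fill
      have hrun : bfsRun i0 j0 num before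
          = bfsLoop n.toNat m.toNat temp num (n.toNat * m.toNat + 1) before
              (mSet (List.replicate n.toNat (List.replicate m.toNat false)) i0 j0 true)
              [(i0, j0)] := by
        simp only [bfsRun]
        rw [hlenb, hm0]
      have hshrep := shaped_replicate n.toNat m.toNat
      have hvis0 : mGet false
          (mSet (List.replicate n.toNat (List.replicate m.toNat false)) i0 j0 true) i0 j0
          = true := by
        refine mGet_mSet_self _ _ _ _ _ ?_ ?_
        · rw [hshrep.1]; exact hi0
        · rw [shaped_getD hshrep hi0]; exact hj0
      have hvis0c : ∀ a b : Nat,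
          mGet false (mSet (List.replicate n.toNat (List.replicate m.toNat false)) i0 j0 true)
            a b = true → (a, b) = (i0, j0) := by
        intro a b h
        by_cases hab : i0 = a ∧ j0 = b
        · simp [hab.1, hab.2]
        · rw [mGet_mSet_ne _ _ _ _ _ _ _ hab, mGet_replicate_false] at h
          exact absurd h (by simp)
      have hinvA : InvA n.toNat m.toNat before temp num (i0, j0) before
          (mSet (List.replicate n.toNat (List.replicate m.toNat false)) i0 j0 true)
          [(i0, j0)] := by
        refine ⟨hshb, shaped_mSet hshrep i0 j0 true, hvis0, ?_, by simp, ?_, ?_, fun _ _ => rfl, ?_⟩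
        · intro p hp
          rw [List.mem_singleton] at hp
          subst hp
          exact ⟨hwin0, hvis0, rfl, Reach.base, rfl⟩
        · intro p hp
          have := hvis0c p.1 p.2 (by cases p; exact hp)
          have hp' : p = (i0, j0) := by cases p; exact this
          subst hp'
          exact ⟨hwin0, Reach.base, rfl⟩
        · intro p hp hnin
          exfalso
          have := hvis0c p.1 p.2 (by cases p; exact hp)
          have hp' : p = (i0, j0) := by cases p; exact this
          exact hnin (hp' ▸ List.mem_singleton.mpr rfl)
        · intro p hp hnin
          exfalso
          have := hvis0c p.1 p.2 (by cases p; exact hp)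
          have hp' : p = (i0, j0) := by cases p; exact this
          exact hnin (hp' ▸ List.mem_singleton.mpr rfl)
      have hFA : ([(i0, j0)] : List (Nat × Nat)).length
          + (n.toNat * m.toNat - cntP (fun c => c)
              (mSet (List.replicate n.toNat (List.replicate m.toNat false)) i0 j0 true))
          < n.toNat * m.toNat + 1 := by
        rw [cnt_vis0 _ _ _ _ hi0 hj0]
        have h1 : 0 < n.toNat * m.toNat := Nat.mul_pos (by omega) (by omega)
        simp only [List.length_cons, List.length_nil]
        omega
      have hA := bfsLoop_char n.toNat m.toNat before temp num (i0, j0)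
        (n.toNat * m.toNat + 1) before
        (mSet (List.replicate n.toNat (List.replicate m.toNat false)) i0 j0 true)
        [(i0, j0)] hinvA hFA
      -- B's component is exactly the reachable set
      have hsG : GoodC n.toNat m.toNat before temp (i0, j0) (i0, j0) :=
        ⟨hwin0, Reach.base, rfl⟩
      have hC : ∀ p : Nat × Nat, p ∈ comp ↔ Reach n.toNat m.toNat before temp (i0, j0) p := by
        intro p
        rw [hcompdef]
        refine growLoop_char n.toNat m.toNat temp before (i0, j0) hsG
          (n.toNat * m.toNat + 1) [(i0, j0)] (List.nodup_singleton _) ?_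
          (List.mem_singleton.mpr rfl) (by simp only [List.length_cons, List.length_nil]; omega) p
        intro q hq
        rw [List.mem_singleton] at hq
        subst hq
        exact hsG
      -- the per-cell checks agree on the window
      have hpt : ∀ a b : Nat, a < n.toNat → b < m.toNat →
          ((if (a, b) ∈ comp then mGet 0 after a b == num
            else mGet 0 after a b == mGet 0 before a b) = true
           ↔ mGet 0 (bfsRun i0 j0 num before) a b = mGet 0 after a b) := by
        intro a b ha hb
        have hw : InWin n.toNat m.toNat (a, b) := ⟨ha, hb⟩
        rw [hrun]
        by_cases hr : Reach n.toNat m.toNat before temp (i0, j0) (a, b)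
        · rw [if_pos ((hC (a, b)).mpr hr), (hA (a, b) hw).1 hr, beq_iff_eq]
          exact comm
        · rw [if_neg (fun hin => hr ((hC (a, b)).mp hin)), (hA (a, b) hw).2 hr, beq_iff_eq]
          exact comm
      -- and therefore the final comparisons agree
      by_cases hex : ∃ a, a < n.toNat ∧ ∃ b, b < m.toNat ∧
          mGet 0 (bfsRun i0 j0 num before) a b ≠ mGet 0 after a b
      · obtain ⟨a, ha, b, hb, hd⟩ := hex
        have hany : ((List.range n.toNat).any (fun r => (List.range m.toNat).any
            (fun c => mGet 0 (bfsRun i0 j0 num before) r c != mGet 0 after r c))) = true := by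
          rw [List.any_eq_true]
          exact ⟨a, List.mem_range.mpr ha, by
            rw [List.any_eq_true]
            exact ⟨b, List.mem_range.mpr hb, bne_iff_ne.mpr hd⟩⟩
        have hallf : ((List.range n.toNat).all (fun a => (List.range m.toNat).all
            (fun b => if (a, b) ∈ comp then mGet 0 after a b == num
              else mGet 0 after a b == mGet 0 before a b))) = false := by
          rw [Bool.eq_false_iff]
          intro hct
          rw [List.all_eq_true] at hct
          have h1 := hct a (List.mem_range.mpr ha)
          rw [List.all_eq_true] at h1
          have h2 := h1 b (List.mem_range.mpr hb)
          exact hd ((hpt a b ha hb).mp h2)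
        rw [if_pos hany, if_neg (by rw [hallf]; exact Bool.false_ne_true)]
      · push Not at hex
        have hanyf : ((List.range n.toNat).any (fun r => (List.range m.toNat).any
            (fun c => mGet 0 (bfsRun i0 j0 num before) r c != mGet 0 after r c))) = false := by
          rw [Bool.eq_false_iff]
          intro hct
          rw [List.any_eq_true] at hct
          obtain ⟨a, ha, h1⟩ := hct
          rw [List.any_eq_true] at h1
          obtain ⟨b, hb, h2⟩ := h1
          rw [bne_iff_ne] at h2
          exact h2 (hex a (List.mem_range.mp ha) b (List.mem_range.mp hb))
        have hallt : ((List.range n.toNat).all (fun a => (List.range m.toNat).all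
            (fun b => if (a, b) ∈ comp then mGet 0 after a b == num
              else mGet 0 after a b == mGet 0 before a b))) = true := by
          rw [List.all_eq_true]
          intro a ha
          rw [List.all_eq_true]
          intro b hb
          exact (hpt a b (List.mem_range.mp ha) (List.mem_range.mp hb)).mpr
            (hex a (List.mem_range.mp ha) b (List.mem_range.mp hb))
        rw [if_neg (by rw [hanyf]; exact Bool.false_ne_true), if_pos hallt]
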